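-- pv_equiv track=rewrite | github.com/OSeMOSYS/MUIO | API/Classes/Case/GMPLParser.py | _split_into_statements
-- ===== SOURCE A (Python) =====
-- def _strip_comment(line: str) -> str:
--     """Remove inline comments.  '#' inside strings is not handled (N/A here)."""
--     idx = line.find("#")
--     if idx >= 0:
--         return line[:idx]
--     return line
--
-- def _clean(line: str) -> str:
--     """Strip comments, replace tabs with spaces, strip outer whitespace."""
--     return _strip_comment(line).replace("\t", " ").strip()
--
-- def _split_into_statements(raw_lines: list[str]) -> list[str]:
--     """Split the file into statements delimited by ';'.
--
--     Comments and blank lines are stripped.  The ';' itself is NOT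
--     included in the returned statement text.
--     """
--     statements: list[str] = []
--     buf: list[str] = []
--
--     for raw in raw_lines:
--         cleaned = _clean(raw)
--         if not cleaned:
--             continue
--
--         # Check for 'end;' as a special terminator.
--         if cleaned.lower().rstrip("; ") == "end":
--             # Flush anything in buffer, then add sentinel.
--             if buf:
--                 statements.append(" ".join(buf))
--                 buf.clear()
--             statements.append("end")
--             break
--
--         # A line may contain one or more ';' (e.g. inline terminators).
--         while ";" in cleaned:
--             idx = cleaned.index(";")
--             before = cleaned[:idx].strip()
--             if before:
--                 buf.append(before)
--             # Flush buffer as one complete statement.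
--             statements.append(" ".join(buf))
--             buf.clear()
--             cleaned = cleaned[idx + 1:].strip()
--
--         if cleaned:
--             buf.append(cleaned)
--
--     # Anything left in buffer (no trailing ';') — flush as-is.
--     if buf:
--         statements.append(" ".join(buf))
--
--     return statements
-- ===== SOURCE B (Python) =====
-- def _clean_line(raw: str) -> str:
--     """Strip comment, turn tabs into spaces, strip outer whitespace."""
--     cut = raw.find("#")
--     if cut >= 0:
--         raw = raw[:cut]
--     return raw.replace("\t", " ").strip()
--
-- def _split_into_statements(raw_lines: list[str]) -> list[str]:
--     # Phase 1: collect cleaned non-empty lines, stopping at an 'end' terminator line.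
--     lines: list[str] = []
--     ended = False
--     for raw in raw_lines:
--         line = _clean_line(raw)
--         if not line:
--             continue
--         if line.lower().rstrip("; ") == "end":
--             ended = True
--             break
--         lines.append(line)
--     # Phase 2: one global split of the whole text on ';'.
--     segments = " ".join(lines).split(";")
--     statements = [seg.strip() for seg in segments[:-1]]
--     tail = segments[-1].strip()
--     if tail:
--         statements.append(tail)
--     if ended:
--         statements.append("end")
--     return statements
-- ===== Notes on version B (the rewrite author's own statement) =====
-- stated objective: alternative
-- what changed: A is an incremental buffer machine (per-line while-loop that repeatedly finds the next ';', flushes a growing buffer list into statements); B is two phases: collect the cleaned lines up to the 'end' terminator, then join them into one string, split it once on ';' and strip each segment.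
import Mathlib
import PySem

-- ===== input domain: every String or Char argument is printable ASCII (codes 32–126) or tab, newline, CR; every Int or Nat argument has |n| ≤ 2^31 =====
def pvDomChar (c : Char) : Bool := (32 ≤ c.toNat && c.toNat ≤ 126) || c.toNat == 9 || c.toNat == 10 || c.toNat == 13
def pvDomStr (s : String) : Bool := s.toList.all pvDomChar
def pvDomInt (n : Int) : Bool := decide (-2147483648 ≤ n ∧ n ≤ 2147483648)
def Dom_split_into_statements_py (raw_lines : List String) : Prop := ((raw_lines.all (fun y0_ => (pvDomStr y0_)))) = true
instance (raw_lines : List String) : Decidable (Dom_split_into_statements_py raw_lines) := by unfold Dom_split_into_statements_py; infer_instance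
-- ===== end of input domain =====

-- B re-implements the statement splitter as two phases (collect cleaned lines, then one
-- global split on ';') instead of A's incremental buffer machine; objective: alternative.

-- ===== SHARED HELPERS (identical Python code in both sources) =====

-- '_clean(line)': strip the '#' comment (line[:line.find('#')] when found), tabs → spaces, strip.
-- line[:idx] with 0 ≤ idx is List.take idx.toNat (exact).
def cleanLine (cs : List Char) : List Char :=
  let idx := PySem.Chars.find cs ['#']
  PySem.Chars.strip (PySem.Chars.replace (if 0 ≤ idx then cs.take idx.toNat else cs) ['\t'] [' '])

-- s.rstrip("; "): drop trailing characters from the two-element set {';', ' '} (exact hand port).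
def rstripSemiSpace (cs : List Char) : List Char :=
  (cs.reverse.dropWhile (fun c => c == ';' || c == ' ')).reverse

-- cleaned.lower().rstrip("; ") == "end"
def isEndLine (cs : List Char) : Bool :=
  rstripSemiSpace (PySem.Chars.lower cs) == ['e', 'n', 'd']

-- (Chars.strip l).length ≤ l.length — cited by innerA's termination proof.
theorem strip_length_le (l : List Char) : (PySem.Chars.strip l).length ≤ l.length := by
  simp only [PySem.Chars.strip, PySem.Chars.rstrip, PySem.Chars.lstrip, List.length_reverse]
  calc (List.dropWhile PySem.Chars.isspace (List.dropWhile PySem.Chars.isspace l).reverse).length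
      ≤ (List.dropWhile PySem.Chars.isspace l).reverse.length := List.length_dropWhile_le _ _
    _ ≤ l.length := by
        simpa using List.length_dropWhile_le PySem.Chars.isspace l

-- ===== PORT A =====

-- A's inner 'while ";" in cleaned' loop over state (statements, buf); the trailing
-- 'if cleaned: buf.append(cleaned)' of the line body is the exit branch.
def innerA (stmts buf : List (List Char)) (cleaned : List Char) :
    List (List Char) × List (List Char) :=
  if h : PySem.Chars.isIn [';'] cleaned then
    let idx := (PySem.Chars.find cleaned [';']).toNat   -- cleaned.index(';'): ';' present, find ≥ 0
    let buf' := if PySem.Chars.strip (cleaned.take idx) ≠ [] then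
        buf ++ [PySem.Chars.strip (cleaned.take idx)] else buf
    innerA (stmts ++ [PySem.Chars.join [' '] buf']) []
      (PySem.Chars.strip (cleaned.drop (idx + 1)))
  else if cleaned ≠ [] then (stmts, buf ++ [cleaned]) else (stmts, buf)
termination_by cleaned.length
decreasing_by
  have hne : cleaned ≠ [] := by
    rcases (PySem.Chars.isIn_iff_infix _ _).mp h with ⟨p, q, hpq⟩
    intro hc; rw [hc] at hpq; simp at hpq
  have h1 : (cleaned.drop ((PySem.Chars.find cleaned [';']).toNat + 1)).length < cleaned.length := by
    have := List.length_pos_iff.mpr hne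
    simp [List.length_drop]; omega
  exact Nat.lt_of_le_of_lt (strip_length_le _) h1

-- A's outer 'for raw in raw_lines' loop, with the 'end' break and the final buffer flush.
def loopA (stmts buf : List (List Char)) : List (List Char) → List (List Char)
  | [] => if buf ≠ [] then stmts ++ [PySem.Chars.join [' '] buf] else stmts
  | raw :: rest =>
    let cleaned := cleanLine raw
    if cleaned = [] then loopA stmts buf rest
    else if isEndLine cleaned then
      (if buf ≠ [] then stmts ++ [PySem.Chars.join [' '] buf] else stmts) ++ [['e','n','d']]
    else
      let sb := innerA stmts buf cleaned
      loopA sb.1 sb.2 rest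

def split_into_statements_py (raw_lines : List String) : List String :=
  (loopA [] [] (raw_lines.map String.toList)).map String.ofList

-- ===== PORT B =====

-- Phase 1: collect cleaned non-empty lines into 'lines', stop (ended = true) at an 'end' line.
def collectB (acc : List (List Char)) : List (List Char) → List (List Char) × Bool
  | [] => (acc, false)
  | raw :: rest =>
    let line := cleanLine raw
    if line = [] then collectB acc rest
    else if isEndLine line then (acc, true)
    else collectB (acc ++ [line]) rest

-- Phase 2: ' '.join(lines).split(';'); strip every segment; keep all but the last,
-- the last only if non-empty; append 'end' if the terminator was seen.
-- segments[-1]/segments[:-1]: str.split always returns ≥ 1 piece, so getLastD []/dropLast are exact.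
def split_into_statements_py_alt (raw_lines : List String) : List String :=
  let ce := collectB [] (raw_lines.map String.toList)
  let segments := PySem.Chars.splitOn (PySem.Chars.join [' '] ce.1) [';']
  let statements := segments.dropLast.map PySem.Chars.strip
  let tail := PySem.Chars.strip (segments.getLastD [])
  let statements := if tail ≠ [] then statements ++ [tail] else statements
  (if ce.2 then statements ++ [['e','n','d']] else statements).map String.ofList

-- ===== PRECONDITION & SPEC =====
def Spec_split_into_statements_py (raw_lines : List String) (out : List String) : Prop := out = split_into_statements_py_alt raw_lines
instance (raw_lines : List String) (out : List String) : Decidable (Spec_split_into_statements_py raw_lines out) := by unfold Spec_split_into_statements_py; infer_instance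

-- ===== CLAIM (what is proved, stated in full; the proofs are below) =====
def Claim_equal_split_into_statements_py : Prop := ∀ (raw_lines : List String), Dom_split_into_statements_py raw_lines → Spec_split_into_statements_py raw_lines (split_into_statements_py raw_lines)

-- ===== LEMMAS AND PROOFS =====

-- ===== bridge: PySem primitives on a single-char separator =====

theorem splitOn_go_single (c : Char) : ∀ (l : List Char) (fuel : Nat) (cur : List Char)
    (acc : List (List Char)), l.length < fuel →
    PySem.Chars.splitOn.go [c] fuel l cur acc =
      acc.reverse ++ List.modifyHead (cur.reverse ++ ·) (List.splitOnP (· == c) l) := by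
  intro l
  induction l with
  | nil =>
    intro fuel cur acc h
    match fuel with
    | fuel + 1 => simp [PySem.Chars.splitOn.go, List.splitOnP_nil]
  | cons a t ih =>
    intro fuel cur acc h
    match fuel with
    | fuel + 1 =>
      rw [PySem.Chars.splitOn.go]
      by_cases hc : c = a
      · subst hc
        simp only [List.isPrefixOf, BEq.rfl, Bool.true_and, if_pos, List.length_cons,
          List.drop_succ_cons]
        simp only [List.length_nil, List.drop_zero]
        rw [ih _ _ _ (by simp at h; omega)]
        rcases hS : List.splitOnP (· == c) t with _ | ⟨s0, srest⟩
        · exact absurd hS (List.splitOnP_ne_nil _ _)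
        · simp [List.splitOnP_cons, hS]
      · have hpre : [c].isPrefixOf (a :: t) = false := by
          simp [List.isPrefixOf]
          exact fun h' => hc h'
        rw [hpre]
        simp only [Bool.false_eq_true, if_false]
        rw [ih _ _ _ (by simp at h; omega)]
        rcases hS : List.splitOnP (· == c) t with _ | ⟨s0, srest⟩
        · exact absurd hS (List.splitOnP_ne_nil _ _)
        · have : (a == c) = false := by simp; exact fun e => hc e.symm
          simp [List.splitOnP_cons, hS, this]

theorem splitOn_single (s : List Char) (c : Char) :
    PySem.Chars.splitOn s [c] = List.splitOnP (· == c) s := by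
  rw [PySem.Chars.splitOn, splitOn_go_single c s (s.length + 1) [] [] (by omega)]
  rcases hS : List.splitOnP (· == c) s with _ | ⟨s0, srest⟩
  · exact absurd hS (List.splitOnP_ne_nil _ _)
  · simp

theorem find_go_single (c : Char) : ∀ (s : List Char) (k : Nat),
    PySem.Chars.find.go [c] s k =
      if c ∈ s then ((k : Int) + (s.takeWhile (fun x => !(x == c))).length) else -1 := by
  intro s
  induction s with
  | nil => intro k; simp [PySem.Chars.find.go, List.isEmpty]
  | cons a t ih =>
    intro k
    rw [PySem.Chars.find.go]
    by_cases hc : c = a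
    · subst hc
      simp [List.isPrefixOf, List.takeWhile]
    · have hpre : [c].isPrefixOf (a :: t) = false := by
        simp [List.isPrefixOf]; exact fun h' => hc h'
      have hac : (a == c) = false := by simp; exact fun e => hc e.symm
      rw [hpre]
      simp only [Bool.false_eq_true, if_false, ih (k + 1)]
      have hmem : (c ∈ a :: t) ↔ (c ∈ t) := by
        simp [List.mem_cons]; intro h'; exact absurd h' hc
      by_cases hm : c ∈ t
      · rw [if_pos hm, if_pos (hmem.mpr hm)]
        simp [List.takeWhile, hac]
        ring
      · rw [if_neg hm, if_neg (fun h' => hm (hmem.mp h'))]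

theorem find_single (s : List Char) (c : Char) :
    PySem.Chars.find s [c] =
      if c ∈ s then ((s.takeWhile (fun x => !(x == c))).length : Int) else -1 := by
  rw [PySem.Chars.find, find_go_single]
  split <;> simp

theorem isIn_single (s : List Char) (c : Char) :
    PySem.Chars.isIn [c] s = true ↔ c ∈ s := by
  rw [PySem.Chars.isIn, find_single]
  constructor
  · intro h; by_contra hm; simp [hm] at h
  · intro h; simp [h]

-- ===== strip toolkit =====

theorem lstrip_append (x y : List Char) :
    PySem.Chars.lstrip (x ++ y) =
      if PySem.Chars.lstrip x = [] then PySem.Chars.lstrip y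
      else PySem.Chars.lstrip x ++ y := by
  simp only [PySem.Chars.lstrip, List.dropWhile_append]
  split <;> split <;> simp_all [List.isEmpty_iff]

theorem rstrip_append (x y : List Char) :
    PySem.Chars.rstrip (x ++ y) =
      if PySem.Chars.rstrip y = [] then PySem.Chars.rstrip x
      else x ++ PySem.Chars.rstrip y := by
  by_cases hy : List.dropWhile PySem.Chars.isspace y.reverse = []
  · simp [PySem.Chars.rstrip, List.reverse_append, List.dropWhile_append, hy]
  · simp [PySem.Chars.rstrip, List.reverse_append, List.dropWhile_append, hy,
      List.isEmpty_iff]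

theorem lstrip_eq_nil_iff (x : List Char) :
    PySem.Chars.lstrip x = [] ↔ ∀ c ∈ x, PySem.Chars.isspace c = true := by
  simp [PySem.Chars.lstrip, List.dropWhile_eq_nil_iff]

theorem rstrip_eq_nil_iff (x : List Char) :
    PySem.Chars.rstrip x = [] ↔ ∀ c ∈ x, PySem.Chars.isspace c = true := by
  simp [PySem.Chars.rstrip, List.dropWhile_eq_nil_iff]

theorem lstrip_length_le (x : List Char) : (PySem.Chars.lstrip x).length ≤ x.length :=
  List.length_dropWhile_le _ _

theorem rstrip_length_le (x : List Char) : (PySem.Chars.rstrip x).length ≤ x.length := by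
  simpa [PySem.Chars.rstrip] using List.length_dropWhile_le PySem.Chars.isspace x.reverse

-- rstrip-fixedness passes to suffixes
theorem rstrip_fix_suffix {x s : List Char} (hx : PySem.Chars.rstrip x = x)
    (hs : s <:+ x) : PySem.Chars.rstrip s = s := by
  rcases hs with ⟨t, rfl⟩
  rw [rstrip_append] at hx
  by_cases h : PySem.Chars.rstrip s = []
  · rw [if_pos h] at hx
    have hlen := rstrip_length_le t
    have h1 : t.length + s.length = (PySem.Chars.rstrip t).length := by rw [hx]; simp
    have hs0 : s = [] := List.length_eq_zero_iff.mp (by omega)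
    simp [hs0, PySem.Chars.rstrip]
  · rw [if_neg h] at hx
    exact List.append_cancel_left hx

-- lstrip-fixedness passes to prefixes
theorem lstrip_fix_prefix {x s : List Char} (hx : PySem.Chars.lstrip x = x)
    (hs : s <+: x) : PySem.Chars.lstrip s = s := by
  rcases hs with ⟨t, rfl⟩
  rw [lstrip_append] at hx
  by_cases h : PySem.Chars.lstrip s = []
  · rw [if_pos h] at hx
    have hlen := lstrip_length_le t
    have h1 : s.length + t.length = (PySem.Chars.lstrip t).length := by rw [hx]; simp
    have hs0 : s = [] := List.length_eq_zero_iff.mp (by omega)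
    simp [hs0, PySem.Chars.lstrip]
  · rw [if_neg h] at hx
    exact List.append_cancel_right hx

theorem lstrip_idem (x : List Char) :
    PySem.Chars.lstrip (PySem.Chars.lstrip x) = PySem.Chars.lstrip x :=
  List.dropWhile_idempotent _ _

theorem rstrip_idem (x : List Char) :
    PySem.Chars.rstrip (PySem.Chars.rstrip x) = PySem.Chars.rstrip x := by
  simp [PySem.Chars.rstrip, List.dropWhile_idempotent]

-- prefixes of lstrip-fixed strings / suffixes of rstrip-fixed strings stay fixed
theorem rstrip_lstrip_fix {r : List Char} (h : PySem.Chars.rstrip r = r) :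
    PySem.Chars.rstrip (PySem.Chars.lstrip r) = PySem.Chars.lstrip r :=
  rstrip_fix_suffix h (List.dropWhile_suffix _)

theorem lstrip_rstrip_fix {r : List Char} (h : PySem.Chars.lstrip r = r) :
    PySem.Chars.lstrip (PySem.Chars.rstrip r) = PySem.Chars.rstrip r := by
  refine lstrip_fix_prefix h ?_
  simpa [PySem.Chars.rstrip] using
    (List.dropWhile_suffix (l := r.reverse) PySem.Chars.isspace).reverse

theorem strip_eq_lstrip {r : List Char} (h : PySem.Chars.rstrip r = r) :
    PySem.Chars.strip r = PySem.Chars.lstrip r := by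
  rw [PySem.Chars.strip, rstrip_lstrip_fix h]

theorem strip_idem (x : List Char) :
    PySem.Chars.strip (PySem.Chars.strip x) = PySem.Chars.strip x := by
  simp only [PySem.Chars.strip]
  rw [lstrip_rstrip_fix (lstrip_idem x), rstrip_idem]

theorem lstrip_allspace_append {w s : List Char} (h : ∀ c ∈ w, PySem.Chars.isspace c = true) :
    PySem.Chars.lstrip (w ++ s) = PySem.Chars.lstrip s := by
  rw [lstrip_append, if_pos ((lstrip_eq_nil_iff w).mpr h)]

-- replacing an rstrip-fixed prefix by its strip does not change the strip of the whole
theorem strip_cong {P : List Char} (h : PySem.Chars.rstrip P = P) (t : List Char) :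
    PySem.Chars.strip (P ++ t) = PySem.Chars.strip (PySem.Chars.strip P ++ t) := by
  rw [strip_eq_lstrip h]
  by_cases hP : PySem.Chars.lstrip P = []
  · have : P = [] := by
      have h2 : PySem.Chars.rstrip P = [] :=
        (rstrip_eq_nil_iff P).mpr ((lstrip_eq_nil_iff P).mp hP)
      rw [h] at h2; exact h2
    simp [this, PySem.Chars.lstrip]
  · simp only [PySem.Chars.strip]
    rw [lstrip_append, if_neg hP, lstrip_append, lstrip_idem, if_neg hP]

-- ===== join toolkit =====

def Jn (l : List (List Char)) : List Char := PySem.Chars.join [' '] l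

def sepL (L : List (List Char)) : List Char := if L = [] then [] else ' ' :: Jn L

def optL (x : List Char) : List (List Char) := if x = [] then [] else [x]

theorem Jn_nil : Jn [] = [] := rfl

theorem Jn_cons (x : List Char) (L : List (List Char)) : Jn (x :: L) = x ++ sepL L := by
  rcases L with _ | ⟨y, t⟩
  · simp [Jn, sepL, PySem.Chars.join, List.intercalate]
  · simp [Jn, sepL, PySem.Chars.join, List.intercalate, List.intersperse]

theorem sepL_and_Jn_append : ∀ a b : List (List Char),
    sepL (a ++ b) = sepL a ++ sepL b ∧
      Jn (a ++ b) = (if a = [] then Jn b else Jn a ++ sepL b) := by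
  intro a
  induction a with
  | nil => intro b; simp [sepL]
  | cons x a' ih =>
    intro b
    have hcons : (x :: a') ++ b = x :: (a' ++ b) := rfl
    constructor
    · rw [hcons]
      show sepL (x :: (a' ++ b)) = sepL (x :: a') ++ sepL b
      simp only [sepL, reduceCtorEq, if_false]
      rw [Jn_cons, Jn_cons, (ih b).1]
      simp
      rfl
    · rw [hcons, Jn_cons, Jn_cons, (ih b).1]
      simp

theorem Jn_append (a b : List (List Char)) :
    Jn (a ++ b) = if a = [] then Jn b else Jn a ++ sepL b :=
  (sepL_and_Jn_append a b).2

-- ===== the buffer invariant =====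

def GoodBuf (buf : List (List Char)) : Prop :=
  ∀ x ∈ buf, x ≠ [] ∧ PySem.Chars.strip x = x ∧ ';' ∉ x

theorem strip_fix_parts {x : List Char} (h : PySem.Chars.strip x = x) :
    PySem.Chars.lstrip x = x ∧ PySem.Chars.rstrip x = x := by
  have hsuf : PySem.Chars.lstrip x <:+ x := List.dropWhile_suffix _
  have hlen : x.length ≤ (PySem.Chars.lstrip x).length := by
    conv_lhs => rw [← h]
    exact rstrip_length_le _
  have hl : PySem.Chars.lstrip x = x :=
    List.IsSuffix.eq_of_length hsuf (Nat.le_antisymm (lstrip_length_le x) hlen)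
  refine ⟨hl, ?_⟩
  rw [PySem.Chars.strip, hl] at h
  exact h

theorem goodJ {buf : List (List Char)} (h : GoodBuf buf) :
    PySem.Chars.lstrip (Jn buf) = Jn buf ∧ PySem.Chars.rstrip (Jn buf) = Jn buf ∧
      ';' ∉ Jn buf ∧ (Jn buf = [] ↔ buf = []) := by
  induction buf with
  | nil => simp [Jn_nil, PySem.Chars.lstrip, PySem.Chars.rstrip]
  | cons x L ih =>
    obtain ⟨hxne, hxs, hxsemi⟩ := h x (by simp)
    obtain ⟨hxl, hxr⟩ := strip_fix_parts hxs
    obtain ⟨ihl, ihr, ihsemi, ihnil⟩ := ih (fun y hy => h y (by simp [hy]))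
    have hJne : L ≠ [] → Jn L ≠ [] := fun hL hJ => hL (ihnil.mp hJ)
    rw [Jn_cons]
    rcases L with _ | ⟨z, t⟩
    · have hsep : sepL ([] : List (List Char)) = [] := by simp [sepL]
      rw [hsep, List.append_nil]
      exact ⟨hxl, hxr, hxsemi, by simp [hxne]⟩
    · have hLne : (z :: t : List (List Char)) ≠ [] := by simp
      have hJLne : Jn (z :: t) ≠ [] := hJne hLne
      simp only [sepL, if_neg hLne]
      constructor
      · rw [lstrip_append, if_neg (by rw [hxl]; exact hxne), hxl]
      constructor
      · have hsp : PySem.Chars.rstrip (' ' :: Jn (z :: t)) = ' ' :: Jn (z :: t) := by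
          have : (' ' :: Jn (z :: t)) = [' '] ++ Jn (z :: t) := rfl
          rw [this, rstrip_append, if_neg (by rw [ihr]; exact hJLne), ihr]
        rw [rstrip_append, if_neg (by rw [hsp]; simp), hsp]
      constructor
      · intro hmem
        rcases List.mem_append.mp hmem with h1 | h1
        · exact hxsemi h1
        · rcases h1 with _ | h1
          · exact ihsemi (by assumption)
      · simp [hxne]

-- A's " ".join(buf)-flush of buf extended by one lstrip-fixed piece, seen through strip
theorem glue {buf : List (List Char)} (hbuf : GoodBuf buf) {c : List Char}
    (hc : PySem.Chars.lstrip c = c) :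
    PySem.Chars.strip (Jn (buf ++ [c])) = Jn (buf ++ optL (PySem.Chars.rstrip c)) := by
  obtain ⟨hJl, hJr, -, hJnil⟩ := goodJ hbuf
  by_cases hbne : buf = []
  · subst hbne
    simp only [List.nil_append]
    have h1 : Jn [c] = c := by simp [Jn_cons, sepL]
    rw [h1, PySem.Chars.strip, hc]
    by_cases hrc : PySem.Chars.rstrip c = []
    · simp [hrc, optL, Jn_nil]
    · simp [optL, hrc, Jn_cons, sepL]
  · have hJne : Jn buf ≠ [] := fun h => hbne (hJnil.mp h)
    have hsep : sepL [c] = ' ' :: c := by simp [sepL, Jn_cons]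
    rw [Jn_append, if_neg hbne, hsep]
    have hx : Jn buf ++ ' ' :: c = (Jn buf ++ [' ']) ++ c := by simp
    have hlfix : PySem.Chars.lstrip (Jn buf ++ ' ' :: c) = Jn buf ++ ' ' :: c := by
      rw [lstrip_append, if_neg (by rw [hJl]; exact hJne), hJl]
    rw [PySem.Chars.strip, hlfix, hx, rstrip_append]
    by_cases hrc : PySem.Chars.rstrip c = []
    · rw [if_pos hrc, rstrip_append, if_pos (by simp [rstrip_eq_nil_iff]; decide), hJr]
      simp [hrc, optL]
    · rw [if_neg hrc]
      simp only [optL, if_neg hrc]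
      rw [Jn_append, if_neg hbne]
      simp [sepL, Jn_cons]

-- ===== splitOnP toolkit (S := List.splitOnP (· == ';')) =====

theorem S_no {a : List Char} (h : ';' ∉ a) : List.splitOnP (· == ';') a = [a] :=
  List.splitOnP_eq_single _ _ (fun x hx => by simp; intro he; exact h (he ▸ hx))

theorem S_app_no {a : List Char} (h : ';' ∉ a) (b : List Char) :
    List.splitOnP (· == ';') (a ++ b) =
      List.modifyHead (a ++ ·) (List.splitOnP (· == ';') b) := by
  induction a with
  | nil =>
    rcases hS : List.splitOnP (· == ';') b with _ | ⟨s0, t⟩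
    · exact absurd hS (List.splitOnP_ne_nil _ _)
    · simp [hS]
  | cons x a' ih =>
    have hx : (x == ';') = false := by
      simp; intro he; exact h (by simp [he])
    have h' : ';' ∉ a' := fun hm => h (by simp [hm])
    rw [List.cons_append, List.splitOnP_cons, hx]
    rw [ih h']
    rcases hS : List.splitOnP (· == ';') b with _ | ⟨s0, t⟩
    · exact absurd hS (List.splitOnP_ne_nil _ _)
    · simp
theorem S_semi {a : List Char} (h : ';' ∉ a) (b : List Char) :
    List.splitOnP (· == ';') (a ++ ';' :: b) = a :: List.splitOnP (· == ';') b := by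
  rw [S_app_no h, List.splitOnP_cons]
  simp

-- ===== the B-side finisher over segment lists =====

def endTok (e : Bool) : List (List Char) := if e then [['e','n','d']] else []

def gFin (segs : List (List Char)) (e : Bool) : List (List Char) :=
  segs.dropLast.map PySem.Chars.strip ++ optL (PySem.Chars.strip (segs.getLastD [])) ++ endTok e

theorem fin_no {a : List Char} (h : ';' ∉ a) (e : Bool) :
    gFin (List.splitOnP (· == ';') a) e = optL (PySem.Chars.strip a) ++ endTok e := by
  rw [S_no h]; simp [gFin]

theorem fin_semi {a : List Char} (h : ';' ∉ a) (t : List Char) (e : Bool) :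
    gFin (List.splitOnP (· == ';') (a ++ ';' :: t)) e =
      PySem.Chars.strip a :: gFin (List.splitOnP (· == ';') t) e := by
  rw [S_semi h]
  rcases hS : List.splitOnP (· == ';') t with _ | ⟨s0, tl⟩
  · exact absurd hS (List.splitOnP_ne_nil _ _)
  · simp [gFin, List.dropLast_cons_of_ne_nil]

theorem fin_precong {P1 P2 : List Char} (h1m : ';' ∉ P1) (h2m : ';' ∉ P2)
    (hs : PySem.Chars.strip P1 = PySem.Chars.strip P2)
    (h1r : PySem.Chars.rstrip P1 = P1) (h2r : PySem.Chars.rstrip P2 = P2)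
    (L : List (List Char)) (e : Bool) :
    gFin (List.splitOnP (· == ';') (P1 ++ sepL L)) e =
      gFin (List.splitOnP (· == ';') (P2 ++ sepL L)) e := by
  rcases L with _ | ⟨y, L'⟩
  · have hsep : sepL ([] : List (List Char)) = [] := by simp [sepL]
    rw [hsep, List.append_nil, List.append_nil, fin_no h1m, fin_no h2m, hs]
  · have hLne : (y :: L' : List (List Char)) ≠ [] := by simp
    simp only [sepL, if_neg hLne]
    rw [S_app_no h1m, S_app_no h2m]
    rcases hS : List.splitOnP (· == ';') (' ' :: Jn (y :: L')) with _ | ⟨s0, tl⟩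
    · exact absurd hS (List.splitOnP_ne_nil _ _)
    · have key : PySem.Chars.strip (P1 ++ s0) = PySem.Chars.strip (P2 ++ s0) := by
        rw [strip_cong h1r, strip_cong h2r, hs]
      rcases tl with _ | ⟨u, tl'⟩
      · simp [gFin, key]
      · simp [gFin, List.dropLast_cons_of_ne_nil, key]

-- ===== accumulator lemmas for the ports =====

-- one-step equations for innerA
theorem innerA_pos {cleaned : List Char} (h : PySem.Chars.isIn [';'] cleaned = true)
    (stmts buf : List (List Char)) :
    innerA stmts buf cleaned =
      innerA (stmts ++ [PySem.Chars.join [' ']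
          (if PySem.Chars.strip (List.take (PySem.Chars.find cleaned [';']).toNat cleaned) ≠ [] then
            buf ++ [PySem.Chars.strip (List.take (PySem.Chars.find cleaned [';']).toNat cleaned)]
          else buf)]) []
        (PySem.Chars.strip (List.drop ((PySem.Chars.find cleaned [';']).toNat + 1) cleaned)) := by
  conv_lhs => rw [innerA]
  rw [dif_pos h]

theorem innerA_neg {cleaned : List Char} (h : PySem.Chars.isIn [';'] cleaned = false)
    (stmts buf : List (List Char)) :
    innerA stmts buf cleaned =
      if cleaned ≠ [] then (stmts, buf ++ [cleaned]) else (stmts, buf) := by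
  conv_lhs => rw [innerA]
  rw [dif_neg (by rw [h]; simp)]

theorem innerA_acc : ∀ (n : Nat) (cleaned : List Char), cleaned.length ≤ n →
    ∀ (stmts buf : List (List Char)),
    innerA stmts buf cleaned =
      (stmts ++ (innerA [] buf cleaned).1, (innerA [] buf cleaned).2) := by
  intro n
  induction n with
  | zero =>
    intro cleaned hlen stmts buf
    have hc : cleaned = [] := List.length_eq_zero_iff.mp (by omega)
    subst hc
    rw [innerA_neg (by decide), innerA_neg (by decide)]
    simp
  | succ n ih =>
    intro cleaned hlen stmts buf
    by_cases h : PySem.Chars.isIn [';'] cleaned = true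
    · rw [innerA_pos h, innerA_pos h]
      have hne : cleaned ≠ [] := by
        intro hc
        rw [hc] at h
        exact absurd h (by decide)
      have hlt : (PySem.Chars.strip
          (cleaned.drop ((PySem.Chars.find cleaned [';']).toNat + 1))).length ≤ n := by
        have h1 := strip_length_le (cleaned.drop ((PySem.Chars.find cleaned [';']).toNat + 1))
        have h2 : (cleaned.drop ((PySem.Chars.find cleaned [';']).toNat + 1)).length
            = cleaned.length - ((PySem.Chars.find cleaned [';']).toNat + 1) := by
          simp [List.length_drop]
        have h3 : 0 < cleaned.length := List.length_pos_iff.mpr hne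
        omega
      rw [ih _ hlt, ih _ hlt ([] ++ _)]
      simp
    · rw [innerA_neg (by simpa using h), innerA_neg (by simpa using h)]
      split <;> simp

theorem loopA_acc : ∀ (ls : List (List Char)) (stmts buf : List (List Char)),
    loopA stmts buf ls = stmts ++ loopA [] buf ls := by
  intro ls
  induction ls with
  | nil => intro stmts buf; simp [loopA]; split <;> simp
  | cons raw rest ih =>
    intro stmts buf
    simp only [loopA]
    split
    · exact ih stmts buf
    · split
      · split <;> simp
      · rw [innerA_acc (cleanLine raw).length _ le_rfl, ih,
          ih ((innerA [] buf (cleanLine raw)).1) ((innerA [] buf (cleanLine raw)).2)]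
        simp

theorem collectB_acc : ∀ (ls : List (List Char)) (acc : List (List Char)),
    collectB acc ls = (acc ++ (collectB [] ls).1, (collectB [] ls).2) := by
  intro ls
  induction ls with
  | nil => intro acc; simp [collectB]
  | cons raw rest ih =>
    intro acc
    simp only [collectB]
    split
    · exact ih acc
    · split
      · simp
      · rw [ih (acc ++ _), ih ([] ++ _)]
        simp

theorem innerA_good : ∀ (n : Nat) (c : List Char), c.length ≤ n →
    PySem.Chars.strip c = c → ∀ (stmts buf : List (List Char)), GoodBuf buf →
    GoodBuf (innerA stmts buf c).2 := by
  intro n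
  induction n with
  | zero =>
    intro c hlen hc stmts buf hbuf
    have h0 : c = [] := List.length_eq_zero_iff.mp (by omega)
    subst h0
    rw [innerA_neg (by decide)]
    simpa using hbuf
  | succ n ih =>
    intro c hlen hc stmts buf hbuf
    by_cases h : PySem.Chars.isIn [';'] c = true
    · rw [innerA_pos h]
      have hne : c ≠ [] := by intro h0; rw [h0] at h; exact absurd h (by decide)
      have hlt : (PySem.Chars.strip
          (c.drop ((PySem.Chars.find c [';']).toNat + 1))).length ≤ n := by
        have h1 := strip_length_le (c.drop ((PySem.Chars.find c [';']).toNat + 1))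
        have h2 : (c.drop ((PySem.Chars.find c [';']).toNat + 1)).length
            = c.length - ((PySem.Chars.find c [';']).toNat + 1) := by
          simp [List.length_drop]
        have h3 : 0 < c.length := List.length_pos_iff.mpr hne
        omega
      exact ih _ hlt (strip_idem _) _ [] (by intro x hx; simp at hx)
    · rw [innerA_neg (by simpa using h)]
      have hsemi : ';' ∉ c := fun hm => h ((isIn_single c ';').mpr hm)
      split
      · intro x hx
        rcases List.mem_append.mp hx with h1 | h1
        · exact hbuf x h1
        · have : x = c := by simpa using h1
          subst this
          exact ⟨by assumption, hc, hsemi⟩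
      · simpa using hbuf

-- ===== small auxiliary facts =====

theorem semi_not_mem_Jn {l : List (List Char)} (h : ∀ x ∈ l, ';' ∉ x) : ';' ∉ Jn l := by
  induction l with
  | nil => simp [Jn_nil]
  | cons x t ih =>
    rw [Jn_cons]
    intro hm
    rcases List.mem_append.mp hm with h1 | h1
    · exact h x (by simp) h1
    · rcases t with _ | ⟨z, t'⟩
      · simp [sepL] at h1
      · simp only [sepL, reduceCtorEq, if_false] at h1
        rcases List.mem_cons.mp h1 with h1 | h1
        · exact absurd h1 (by decide)
        · exact ih (fun y hy => h y (by simp [hy])) h1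

theorem strip_space_cons (h : List Char) :
    PySem.Chars.strip (' ' :: h) = PySem.Chars.strip h := by
  have hsp : PySem.Chars.isspace ' ' = true := by decide
  simp [PySem.Chars.strip, PySem.Chars.lstrip, List.dropWhile_cons, hsp]

theorem fin_sp (L : List (List Char)) (e : Bool) :
    gFin (List.splitOnP (· == ';') (sepL L)) e =
      gFin (List.splitOnP (· == ';') (Jn L)) e := by
  rcases L with _ | ⟨y, L'⟩
  · simp [sepL, Jn_nil, List.splitOnP_nil]
  · have hLne : (y :: L' : List (List Char)) ≠ [] := by simp
    simp only [sepL, if_neg hLne]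
    have : (' ' :: Jn (y :: L')) = [' '] ++ Jn (y :: L') := rfl
    rw [this, S_app_no (by decide)]
    rcases hS : List.splitOnP (· == ';') (Jn (y :: L')) with _ | ⟨s0, tl⟩
    · exact absurd hS (List.splitOnP_ne_nil _ _)
    · rcases tl with _ | ⟨u, tl'⟩
      · simp [gFin, strip_space_cons]
      · simp [gFin, List.dropLast_cons_of_ne_nil, strip_space_cons]

theorem mem_lstrip_iff (r : List Char) : ';' ∈ PySem.Chars.lstrip r ↔ ';' ∈ r := by
  constructor
  · intro h
    exact List.IsSuffix.mem h (List.dropWhile_suffix _)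
  · intro h
    have hdec := List.takeWhile_append_dropWhile
      (p := PySem.Chars.isspace) (l := r)
    have : ';' ∈ r.takeWhile PySem.Chars.isspace ∨ ';' ∈ PySem.Chars.lstrip r := by
      rw [PySem.Chars.lstrip, ← List.mem_append, hdec]
      exact h
    rcases this with h1 | h1
    · have := List.mem_takeWhile_imp h1
      exact absurd this (by decide)
    · exact h1

theorem take_len_takeWhile (p : Char → Bool) (l : List Char) :
    l.take (l.takeWhile p).length = l.takeWhile p := by
  induction l with
  | nil => simp
  | cons x t ih =>
    by_cases h : p x
    · simp [List.takeWhile_cons, h, ih]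
    · simp [List.takeWhile_cons, h]

theorem drop_len_takeWhile (p : Char → Bool) (l : List Char) :
    l.drop (l.takeWhile p).length = l.dropWhile p := by
  have h := List.drop_left (l₁ := l.takeWhile p) (l₂ := l.dropWhile p)
  rw [List.takeWhile_append_dropWhile] at h
  exact h

theorem dropWhile_semi_head : ∀ {l : List Char}, ';' ∈ l →
    ∃ r0, l.dropWhile (fun x => !(x == ';')) = ';' :: r0 := by
  intro l
  induction l with
  | nil => intro h; simp at h
  | cons a t ih =>
    intro h
    by_cases ha : a = ';'
    · subst ha
      exact ⟨t, by simp [List.dropWhile_cons]⟩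
    · have hat : (!(a == ';')) = true := by simp [ha]
      have hmem : ';' ∈ t := by
        rcases List.mem_cons.mp h with h1 | h1
        · exact absurd h1.symm ha
        · exact h1
      rcases ih hmem with ⟨r0, hr0⟩
      exact ⟨r0, by simp [List.dropWhile_cons, hat, hr0]⟩

theorem Jn_rstrip_ext {buf : List (List Char)} (hbuf : GoodBuf buf) {r : List Char}
    (hr : PySem.Chars.rstrip r = r) (hrne : r ≠ []) :
    PySem.Chars.rstrip (Jn (buf ++ [r])) = Jn (buf ++ [r]) := by
  obtain ⟨-, hJr, -, hJnil⟩ := goodJ hbuf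
  by_cases hb : buf = []
  · subst hb; simpa [Jn_cons, sepL] using hr
  · rw [Jn_append, if_neg hb]
    have hsep : sepL [r] = ' ' :: r := by simp [sepL, Jn_cons]
    rw [hsep, rstrip_append]
    have h1 : PySem.Chars.rstrip (' ' :: r) = ' ' :: r := by
      have : (' ' :: r) = [' '] ++ r := rfl
      rw [this, rstrip_append, if_neg (by rw [hr]; exact hrne), hr]
    rw [if_neg (by rw [h1]; simp), h1]

-- ===== the inner-loop ↔ global-split correspondence =====

theorem star : ∀ (n : Nat) (r : List Char), r.length ≤ n →
    PySem.Chars.rstrip r = r →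
    ∀ (buf : List (List Char)), GoodBuf buf →
    (buf ≠ [] → (PySem.Chars.lstrip r = r ∧ r ≠ [])) →
    ∀ (L : List (List Char)) (e : Bool),
    gFin (List.splitOnP (· == ';') (Jn (buf ++ r :: L))) e =
      (innerA [] buf (PySem.Chars.lstrip r)).1 ++
        gFin (List.splitOnP (· == ';') (Jn ((innerA [] buf (PySem.Chars.lstrip r)).2 ++ L))) e := by
  intro n
  induction n with
  | zero =>
    intro r hlen hr buf hbuf hbr L e
    have hr0 : r = [] := List.length_eq_zero_iff.mp (by omega)
    subst hr0
    have hb : buf = [] := by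
      by_contra hb
      exact (hbr hb).2 rfl
    subst hb
    rw [innerA_neg (by decide)]
    simp only [List.nil_append, ne_eq, not_true_eq_false, if_false, reduceIte]
    have h1 : Jn ([] :: L) = sepL L := by rw [Jn_cons]; simp
    rw [h1]
    simpa using fin_sp L e
  | succ n ih =>
    intro r hlen hr buf hbuf hbr L e
    by_cases hsem : ';' ∈ r
    · -- the line still contains a ';'
      have hsemlr : ';' ∈ PySem.Chars.lstrip r := (mem_lstrip_iff r).mpr hsem
      have hin : PySem.Chars.isIn [';'] (PySem.Chars.lstrip r) = true :=
        (isIn_single _ _).mpr hsemlr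
      have hlrfix : PySem.Chars.lstrip (PySem.Chars.lstrip r) = PySem.Chars.lstrip r :=
        lstrip_idem r
      have hlrr : PySem.Chars.rstrip (PySem.Chars.lstrip r) = PySem.Chars.lstrip r :=
        rstrip_lstrip_fix hr
      obtain ⟨r0, hr0⟩ := dropWhile_semi_head hsemlr
      have hdecomp : PySem.Chars.lstrip r =
          ((PySem.Chars.lstrip r).takeWhile (fun x => !(x == ';'))) ++ ';' :: r0 := by
        conv_lhs => rw [← List.takeWhile_append_dropWhile
          (p := fun x => !(x == ';')) (l := PySem.Chars.lstrip r)]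
        rw [hr0]
      set c0 := (PySem.Chars.lstrip r).takeWhile (fun x => !(x == ';')) with hc0
      have hfind : (PySem.Chars.find (PySem.Chars.lstrip r) [';']).toNat = c0.length := by
        rw [find_single, if_pos hsemlr]
        simp [hc0]
      have htake : (PySem.Chars.lstrip r).take c0.length = c0 := take_len_takeWhile _ _
      have hdropw : (PySem.Chars.lstrip r).drop c0.length = ';' :: r0 := by
        rw [hc0, drop_len_takeWhile]; exact hr0
      have hdrop : (PySem.Chars.lstrip r).drop (c0.length + 1) = r0 := by
        rw [← List.drop_drop, hdropw]
        simp
      have hc0semi : ';' ∉ c0 := by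
        intro hm
        have := List.mem_takeWhile_imp hm
        simp at this
      have hr0r : PySem.Chars.rstrip r0 = r0 :=
        rstrip_fix_suffix hlrr ⟨c0 ++ [';'], by rw [hdecomp]; simp⟩
      have hr0len : r0.length ≤ n := by
        have h1 : (PySem.Chars.lstrip r).length = c0.length + 1 + r0.length := by
          conv_lhs => rw [hdecomp]
          simp
          omega
        have h2 := lstrip_length_le r
        omega
      have hstripr0 : PySem.Chars.strip r0 = PySem.Chars.lstrip r0 := strip_eq_lstrip hr0r
      -- unfold one innerA step
      rw [innerA_pos hin, hfind, htake, hdrop, hstripr0]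
      rw [innerA_acc r0.length _ (lstrip_length_le r0) _ _]
      -- the flushed statement
      set bufC := (if PySem.Chars.strip c0 ≠ [] then buf ++ [PySem.Chars.strip c0] else buf)
        with hbufC
      have hJbufC : Jn bufC = Jn (buf ++ optL (PySem.Chars.strip c0)) := by
        rw [hbufC]
        by_cases hsc : PySem.Chars.strip c0 = []
        · simp [hsc, optL]
        · simp [hsc, optL]
      have ihr := ih r0 hr0len hr0r [] (by intro x hx; simp at hx) (by simp) L e
      simp only [List.nil_append] at ihr
      have hJnr0 : r0 ++ sepL L = Jn (r0 :: L) := (Jn_cons r0 L).symm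
      by_cases hb : buf = []
      · subst hb
        -- stream = (spaces ++ c0) ++ ';' :: (r0 ++ sepL L)
        have hw : r = r.takeWhile PySem.Chars.isspace ++ PySem.Chars.lstrip r := by
          conv_lhs => rw [← List.takeWhile_append_dropWhile
            (p := PySem.Chars.isspace) (l := r)]
          rw [PySem.Chars.lstrip]
        have hstream : Jn ([] ++ r :: L) =
            (r.takeWhile PySem.Chars.isspace ++ c0) ++ ';' :: (r0 ++ sepL L) := by
          rw [List.nil_append, Jn_cons]
          conv_lhs => rw [hw, hdecomp]
          simp
        have hfree : ';' ∉ r.takeWhile PySem.Chars.isspace ++ c0 := by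
          intro hm
          rcases List.mem_append.mp hm with h1 | h1
          · exact absurd (List.mem_takeWhile_imp h1) (by decide)
          · exact hc0semi h1
        rw [hstream, fin_semi hfree, hJnr0, ihr]
        have hstripw : PySem.Chars.strip (r.takeWhile PySem.Chars.isspace ++ c0) =
            PySem.Chars.strip c0 := by
          rw [PySem.Chars.strip, PySem.Chars.strip,
            lstrip_allspace_append (fun c hc => List.mem_takeWhile_imp hc)]
        have hJC : Jn bufC = PySem.Chars.strip c0 := by
          rw [hJbufC]
          by_cases hsc : PySem.Chars.strip c0 = []
          · simp [hsc, optL, Jn_nil]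
          · simp [optL, hsc, Jn_cons, sepL]
        rw [hstripw, ← hJC]
        simp [Jn]
      · -- buf nonempty: the line is fully stripped already
        have hlrr2 : PySem.Chars.lstrip r = r := (hbr hb).1
        have hstream : Jn (buf ++ r :: L) =
            (Jn buf ++ ' ' :: c0) ++ ';' :: (r0 ++ sepL L) := by
          rw [show buf ++ r :: L = (buf ++ [r]) ++ L by simp, Jn_append,
            if_neg (by simp), Jn_append, if_neg hb]
          have hsr : sepL [r] = ' ' :: r := by simp [sepL, Jn_cons]
          rw [hsr]
          conv_lhs => rw [← hlrr2, hdecomp]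
          simp
        have hfree : ';' ∉ Jn buf ++ ' ' :: c0 := by
          intro hm
          rcases List.mem_append.mp hm with h1 | h1
          · exact (goodJ hbuf).2.2.1 h1
          · rcases List.mem_cons.mp h1 with h1 | h1
            · exact absurd h1 (by decide)
            · exact hc0semi h1
        rw [hstream, fin_semi hfree, hJnr0, ihr]
        have hc0l : PySem.Chars.lstrip c0 = c0 := by
          refine lstrip_fix_prefix hlrfix ?_
          exact List.takeWhile_prefix _
        have hJc : Jn (buf ++ [c0]) = Jn buf ++ ' ' :: c0 := by
          rw [Jn_append, if_neg hb]
          simp [sepL, Jn_cons]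
        have hglue := glue hbuf hc0l
        rw [hJc] at hglue
        have hrc0 : PySem.Chars.rstrip c0 = PySem.Chars.strip c0 := by
          rw [PySem.Chars.strip, hc0l]
        rw [hrc0] at hglue
        rw [hglue, ← hJbufC]
        simp [Jn]
    · -- no ';' in the line
      have hsemlr : ';' ∉ PySem.Chars.lstrip r := fun h => hsem ((mem_lstrip_iff r).mp h)
      have hin : PySem.Chars.isIn [';'] (PySem.Chars.lstrip r) = false := by
        by_contra h
        exact hsemlr ((isIn_single _ _).mp (by revert h; cases PySem.Chars.isIn [';'] (PySem.Chars.lstrip r) <;> simp))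
      rw [innerA_neg hin]
      by_cases hlr : PySem.Chars.lstrip r = []
      · have hrnil : r = [] := by
          have h1 : PySem.Chars.rstrip r = [] :=
            (rstrip_eq_nil_iff r).mpr ((lstrip_eq_nil_iff r).mp hlr)
          rw [hr] at h1; exact h1
        subst hrnil
        have hb : buf = [] := by
          by_contra hb
          exact (hbr hb).2 rfl
        subst hb
        simp only [hlr, List.nil_append, ne_eq, not_true_eq_false, if_false, reduceIte]
        have h1 : Jn ([] :: L) = sepL L := by rw [Jn_cons]; simp
        rw [h1]
        simpa using fin_sp L e
      · rw [if_pos hlr]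
        simp only []
        have hP1 : Jn (buf ++ r :: L) = Jn (buf ++ [r]) ++ sepL L := by
          rw [show buf ++ r :: L = (buf ++ [r]) ++ L by simp, Jn_append,
            if_neg (by simp)]
        have hP2 : Jn ((buf ++ [PySem.Chars.lstrip r]) ++ L) =
            Jn (buf ++ [PySem.Chars.lstrip r]) ++ sepL L := by
          rw [Jn_append, if_neg (by simp)]
        rw [hP1, hP2]
        have hrne : r ≠ [] := fun h0 => hlr (by rw [h0]; rfl)
        refine fin_precong ?_ ?_ ?_ ?_ ?_ L e
        · exact semi_not_mem_Jn (by
            intro x hx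
            rcases List.mem_append.mp hx with h1 | h1
            · exact (hbuf x h1).2.2
            · have : x = r := by simpa using h1
              subst this; exact hsem)
        · exact semi_not_mem_Jn (by
            intro x hx
            rcases List.mem_append.mp hx with h1 | h1
            · exact (hbuf x h1).2.2
            · have : x = PySem.Chars.lstrip r := by simpa using h1
              subst this; exact hsemlr)
        · by_cases hb : buf = []
          · subst hb
            have e1 : Jn ([r]) = r := by simp [Jn_cons, sepL]
            have e2 : Jn ([PySem.Chars.lstrip r]) = PySem.Chars.lstrip r := by
              simp [Jn_cons, sepL]
            simp only [List.nil_append, e1, e2]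
            rw [PySem.Chars.strip, PySem.Chars.strip, lstrip_idem]
          · rw [(hbr hb).1]
        · exact Jn_rstrip_ext hbuf hr hrne
        · exact Jn_rstrip_ext hbuf (rstrip_lstrip_fix hr) hlr

-- cleanLine output is strip-fixed
theorem cleanLine_stripped (raw : List Char) :
    PySem.Chars.strip (cleanLine raw) = cleanLine raw := by
  rw [cleanLine]
  exact strip_idem _

theorem mainA : ∀ (ls : List (List Char)) (buf : List (List Char)), GoodBuf buf →
    loopA [] buf ls =
      gFin (List.splitOnP (· == ';') (Jn (buf ++ (collectB [] ls).1)))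
        (collectB [] ls).2 := by
  intro ls
  induction ls with
  | nil =>
    intro buf hbuf
    obtain ⟨hl, hr2, hsm, hnil⟩ := goodJ hbuf
    simp only [loopA, collectB, List.append_nil]
    rw [fin_no hsm]
    have hs : PySem.Chars.strip (Jn buf) = Jn buf := by
      rw [PySem.Chars.strip, hl, hr2]
    rw [hs]
    by_cases hb : buf = []
    · subst hb
      simp [optL, Jn_nil, endTok]
    · have hJ : PySem.Chars.join [' '] buf ≠ [] := fun h => hb (hnil.mp h)
      simp [optL, hJ, hb, endTok, Jn]
  | cons raw rest ih =>
    intro buf hbuf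
    obtain ⟨hl, hr2, hsm, hnil⟩ := goodJ hbuf
    simp only [loopA, collectB]
    by_cases h1 : cleanLine raw = []
    · simp only [h1, reduceIte]
      exact ih buf hbuf
    · by_cases h2 : isEndLine (cleanLine raw) = true
      · simp only [h1, h2, reduceIte, if_neg h1]
        simp only [List.append_nil]
        rw [fin_no hsm]
        have hs : PySem.Chars.strip (Jn buf) = Jn buf := by
          rw [PySem.Chars.strip, hl, hr2]
        rw [hs]
        by_cases hb : buf = []
        · subst hb
          simp [optL, Jn_nil, endTok]
        · have hJ : PySem.Chars.join [' '] buf ≠ [] := fun h => hb (hnil.mp h)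
          simp [optL, hJ, hb, endTok, Jn]
      · simp only [h1, h2, reduceIte, if_neg h1, Bool.false_eq_true]
        have hstrip : PySem.Chars.strip (cleanLine raw) = cleanLine raw :=
          cleanLine_stripped raw
        obtain ⟨hcl, hcr⟩ := strip_fix_parts hstrip
        rw [loopA_acc, ih _ (innerA_good (cleanLine raw).length _ le_rfl hstrip _ _ hbuf)]
        rw [collectB_acc rest ([] ++ [cleanLine raw])]
        have hsh : buf ++ (([] ++ [cleanLine raw]) ++ (collectB [] rest).1) =
            buf ++ cleanLine raw :: (collectB [] rest).1 := by simp
        rw [hsh]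
        have hstar := star (cleanLine raw).length (cleanLine raw) le_rfl hcr buf hbuf
          (fun _ => ⟨hcl, h1⟩) (collectB [] rest).1 (collectB [] rest).2
        rw [hcl] at hstar
        exact hstar.symm ▸ rfl

theorem main_equiv2 (ls : List (List Char)) :
    loopA [] [] ls =
      (let ce := collectB [] ls
       let segments := PySem.Chars.splitOn (PySem.Chars.join [' '] ce.1) [';']
       let statements := segments.dropLast.map PySem.Chars.strip
       let tail := PySem.Chars.strip (segments.getLastD [])
       let statements := if tail ≠ [] then statements ++ [tail] else statements
       if ce.2 then statements ++ [['e','n','d']] else statements) := by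
  rw [mainA ls [] (by intro x hx; simp at hx)]
  simp only [List.nil_append, splitOn_single, gFin, optL, endTok, Jn]
  split_ifs <;> simp_all

-- ===== VERDICT (by name: the statement is the Claim_ definition above) =====
theorem split_into_statements_py_spec : Claim_equal_split_into_statements_py := by
  intro raw_lines _
  unfold Spec_split_into_statements_py split_into_statements_py split_into_statements_py_alt
  rw [main_equiv2]
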